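-- pv_equiv track=rewrite | github.com/angga1997-bot/Protracksys-v-1.02 | Program/pages/dashboard_page.py | _words_to_ascii
-- ===== SOURCE A (Python) =====
-- def _words_to_ascii(words):
--     """Convert list of PLC uint16 words to ASCII string (stops at 0x00)."""
--     result = ""
--     for w in words:
--         hi = (w >> 8) & 0xFF
--         lo = w & 0xFF
--         if hi == 0:
--             break
--         result += chr(hi) if 0x20 <= hi <= 0x7E else "?"
--         if lo == 0:
--             break
--         result += chr(lo) if 0x20 <= lo <= 0x7E else "?"
--     return result.strip()
-- ===== SOURCE B (Python) =====
-- def _words_to_ascii(words):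
--     """Flatten words to bytes, cut at the first zero byte, then map+join+strip."""
--     byte_list = [b for w in words for b in ((w >> 8) & 0xFF, w & 0xFF)]
--     try:
--         n = byte_list.index(0)
--     except ValueError:
--         n = len(byte_list)
--     return "".join(chr(b) if 0x20 <= b <= 0x7E else "?" for b in byte_list[:n]).strip()
-- ===== Notes on version B (the rewrite author's own statement) =====
-- stated objective: alternative
-- what changed: Replaces the interleaved hi/lo loop with double break by a flatten-to-bytes / find-first-zero / map-prefix-join pipeline.
import Mathlib
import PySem

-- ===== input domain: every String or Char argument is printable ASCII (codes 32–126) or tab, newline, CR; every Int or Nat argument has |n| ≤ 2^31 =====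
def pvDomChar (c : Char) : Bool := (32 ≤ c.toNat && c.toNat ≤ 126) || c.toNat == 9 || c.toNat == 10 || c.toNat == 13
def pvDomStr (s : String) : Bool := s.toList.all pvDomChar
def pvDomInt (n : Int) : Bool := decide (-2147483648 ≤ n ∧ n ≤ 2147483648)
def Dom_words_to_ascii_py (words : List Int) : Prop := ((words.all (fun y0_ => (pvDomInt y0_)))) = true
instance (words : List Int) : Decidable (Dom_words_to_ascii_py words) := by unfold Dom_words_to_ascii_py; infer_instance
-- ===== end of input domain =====

-- B replaces A's interleaved break-on-zero loop by a flatten / find-first-zero / map-prefix pipeline (alternative decomposition, same cost).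

-- ===== PORT A =====
-- (w >> 8) & 0xFF and w & 0xFF ported exactly as floordiv/mod by 256 (Python's arithmetic
-- shift and mask on arbitrary ints are floor division and nonnegative remainder).
def wtaLoop (words : List Int) (result : String) : String :=
  match words with
  | [] => result
  | w :: ws =>
    let hi := PySem.Int.mod (PySem.Int.floordiv w 256) 256
    let lo := PySem.Int.mod w 256
    if hi = 0 then result
    else
      let result := result ++ String.ofList [if 0x20 ≤ hi ∧ hi ≤ 0x7E then Char.ofNat hi.toNat else '?']
      if lo = 0 then result
      else wtaLoop ws (result ++ String.ofList [if 0x20 ≤ lo ∧ lo ≤ 0x7E then Char.ofNat lo.toNat else '?'])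

def words_to_ascii_py (words : List Int) : String :=
  PySem.Str.strip (wtaLoop words "")

-- ===== PORT B =====
def words_to_ascii_py_alt (words : List Int) : String :=
  let bytes := words.flatMap (fun w => [PySem.Int.mod (PySem.Int.floordiv w 256) 256, PySem.Int.mod w 256])
  let n : Nat := (PySem.List.index? bytes 0).getD bytes.length
  let pre := PySem.List.slice bytes none (some (n : Int))
  PySem.Str.strip (String.ofList (pre.map (fun b => if 0x20 ≤ b ∧ b ≤ 0x7E then Char.ofNat b.toNat else '?')))

-- ===== PRECONDITION & SPEC =====
def Spec_words_to_ascii_py (words : List Int) (out : String) : Prop := out = words_to_ascii_py_alt words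
instance (words : List Int) (out : String) : Decidable (Spec_words_to_ascii_py words out) := by unfold Spec_words_to_ascii_py; infer_instance

-- ===== CLAIM (what is proved, stated in full; the proofs are below) =====
def Claim_equal_words_to_ascii_py : Prop := ∀ (words : List Int), Dom_words_to_ascii_py words → Spec_words_to_ascii_py words (words_to_ascii_py words)

-- ===== LEMMAS AND PROOFS =====

theorem takeWhile_ne_eq_self (xs : List Int) (h : (0:Int) ∉ xs) :
    xs = List.takeWhile (fun b => b != 0) xs := by
  induction xs with
  | nil => rfl
  | cons x xs ih =>
    simp only [List.mem_cons, not_or] at h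
    rw [List.takeWhile_cons, if_pos (by simpa using fun e => h.1 e.symm), ← ih h.2]

-- Taking up to the first occurrence of 0 is takeWhile (· ≠ 0).
theorem take_index_eq_takeWhile (xs : List Int) :
    xs.take ((PySem.List.index? xs 0).getD xs.length) = xs.takeWhile (fun b => b != 0) := by
  induction xs with
  | nil => simp
  | cons x xs ih =>
    by_cases hx : x = 0
    · subst hx
      rw [PySem.List.index?_cons_self]
      simp
    · rw [PySem.List.index?_cons_of_ne xs hx]
      cases h : PySem.List.index? xs 0 with
      | none =>
        rw [PySem.List.index?_eq_none_iff] at h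
        simp only [Option.map_none, Option.getD_none, List.length_cons, List.take_succ_cons,
          List.take_length, List.takeWhile_cons]
        rw [if_pos (by simpa using hx)]
        exact congrArg (List.cons x) (takeWhile_ne_eq_self xs h)
      | some k =>
        rw [h] at ih
        simp only [Option.map_some, Option.getD_some, List.take_succ_cons, List.takeWhile_cons]
        rw [if_pos (by simpa using hx)]
        exact congrArg (List.cons x) ih

-- A's loop equals acc ++ chars of the takeWhile-prefix of the flattened bytes.
theorem wtaLoop_eq (words : List Int) (acc : String) :
    wtaLoop words acc =
      acc ++ String.ofList
        (((words.flatMap (fun w => [PySem.Int.mod (PySem.Int.floordiv w 256) 256, PySem.Int.mod w 256])).takeWhile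
            (fun b => b != 0)).map
          (fun b => if 0x20 ≤ b ∧ b ≤ 0x7E then Char.ofNat b.toNat else '?')) := by
  induction words generalizing acc with
  | nil => simp [wtaLoop]
  | cons w ws ih =>
    rw [wtaLoop]
    simp only [List.flatMap_cons, List.cons_append, List.nil_append]
    set hi := PySem.Int.mod (PySem.Int.floordiv w 256) 256 with hh
    set lo := PySem.Int.mod w 256 with hl
    rw [List.takeWhile_cons]
    by_cases hhi : hi = 0
    · simp [hhi]
    · by_cases hlo : lo = 0
      · simp [hhi, hlo]
      · rw [if_neg hhi, if_neg hlo, ih, if_pos (show ((hi != 0) = true) by simpa using hhi),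
          List.takeWhile_cons, if_pos (show ((lo != 0) = true) by simpa using hlo),
          List.map_cons, List.map_cons,
          show ∀ (c d : Char) (L : List Char), (c :: d :: L) = [c] ++ [d] ++ L from fun _ _ _ => rfl,
          String.ofList_append, String.ofList_append]
        simp [String.append_assoc]

theorem words_to_ascii_py_eq (words : List Int) :
    words_to_ascii_py words = words_to_ascii_py_alt words := by
  unfold words_to_ascii_py words_to_ascii_py_alt
  rw [wtaLoop_eq]
  simp only [PySem.List.slice_to_natCast, take_index_eq_takeWhile]
  simp

-- ===== VERDICT (by name: the statement is the Claim_ definition above) =====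
theorem words_to_ascii_py_spec : Claim_equal_words_to_ascii_py := by
  intro words _
  exact words_to_ascii_py_eq words
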